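-- pv_equiv track=rewrite | github.com/ryzeon-dev/bmdla | src/core.py | _detectIllegalQuery
-- ===== SOURCE A (Python) =====
-- def _detectIllegalQuery(query):
--     query = query.lower()
--
--     insert = False
--     delete = False
--     update = False
--     drop = False
--     create = False
--
--     last = None
--
--     for chunk in query.split(' '):
--         if not chunk.strip():
--             continue
--
--         if chunk == 'into' and last == 'insert':
--             insert = True
--
--         elif chunk == 'from' and last == 'delete':
--             delete = True
--
--         elif chunk == 'table' and last == 'create':
--             create = True
--
--         elif chunk == 'table' and last == 'drop':
--             drop = True
--
--         elif chunk == 'update':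
--             update = True
--
--         last = chunk
--
--     return insert or delete or create or update or drop
-- ===== SOURCE B (Python) =====
-- PAIRS = (('insert', 'into'), ('delete', 'from'), ('create', 'table'), ('drop', 'table'))
--
--
-- def _detectIllegalQuery(query):
--     words = [c for c in query.lower().split(' ') if c.strip()]
--     # inverted positional index: word -> list of positions
--     index = {}
--     for i, w in enumerate(words):
--         index.setdefault(w, []).append(i)
--     return 'update' in index or any(
--         i + 1 in index.get(b, []) for a, b in PAIRS for i in index.get(a, []))
-- ===== Notes on version B (the rewrite author's own statement) =====
-- stated objective: alternative
-- what changed: Replaced the single-pass five-flag state machine carrying the previous token with a two-stage algorithm: first build an inverted positional index (a dict mapping each token to its list of positions), then decide by dictionary lookups whether 'update' is a key or any illegal pair (a,b) has a position of a whose successor position holds b.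
import Mathlib
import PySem

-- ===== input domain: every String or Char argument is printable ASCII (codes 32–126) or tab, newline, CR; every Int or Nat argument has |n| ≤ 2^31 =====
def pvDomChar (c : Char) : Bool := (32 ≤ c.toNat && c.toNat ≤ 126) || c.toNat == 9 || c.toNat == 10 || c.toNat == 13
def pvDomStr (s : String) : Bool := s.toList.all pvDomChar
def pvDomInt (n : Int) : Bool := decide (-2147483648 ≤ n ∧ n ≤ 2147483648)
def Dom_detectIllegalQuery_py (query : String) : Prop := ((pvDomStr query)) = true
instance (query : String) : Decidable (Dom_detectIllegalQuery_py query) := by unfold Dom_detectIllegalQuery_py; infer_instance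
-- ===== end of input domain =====

-- B replaces A's carried-last flag state machine by a two-stage algorithm: build an
-- inverted positional index (token -> list of positions), then answer by dictionary
-- lookups on the five illegal patterns (objective: alternative).

-- ===== PORT A =====
-- loop body of A's for-loop, named so the fold is readable (same code, same state)
def pvStep (st : Bool × Bool × Bool × Bool × Bool × Option String) (chunk : String) :
    Bool × Bool × Bool × Bool × Bool × Option String :=
  match st with
  | (insert, delete, update, drop, create, last) =>
    if PySem.Str.strip chunk == "" then st
    else if chunk == "into" && last == some "insert" then
      (true, delete, update, drop, create, some chunk)
    else if chunk == "from" && last == some "delete" then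
      (insert, true, update, drop, create, some chunk)
    else if chunk == "table" && last == some "create" then
      (insert, delete, update, drop, true, some chunk)
    else if chunk == "table" && last == some "drop" then
      (insert, delete, update, true, create, some chunk)
    else if chunk == "update" then
      (insert, delete, true, drop, create, some chunk)
    else
      (insert, delete, update, drop, create, some chunk)

def detectIllegalQuery_py (query : String) : Bool :=
  let q := PySem.Str.lower query
  match ((PySem.Str.split? q " ").getD []).foldl pvStep (false, false, false, false, false, none) with
  | (insert, delete, update, drop, create, _) => insert || delete || create || update || drop

-- ===== PORT B =====
def pvPairs : List (String × String) :=
  [("insert", "into"), ("delete", "from"), ("create", "table"), ("drop", "table")]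

def detectIllegalQuery_py_alt (query : String) : Bool :=
  let words := ((PySem.Str.split? (PySem.Str.lower query) " ").getD []).filter
    (fun c => !(PySem.Str.strip c == ""))
  -- index = {}; for i, w in enumerate(words): index.setdefault(w, []).append(i)
  let index := (PySem.List.enumerate words).foldl
    (fun d (p : Int × String) => d.modify p.2 ([] : List Int) (· ++ [p.1])) PySem.Dict.empty
  index.contains "update" || pvPairs.any (fun ab =>
    (index.getD ab.1 []).any (fun i => (index.getD ab.2 []).contains (i + 1)))

-- ===== PRECONDITION & SPEC =====
def Spec_detectIllegalQuery_py (query : String) (out : Bool) : Prop := out = detectIllegalQuery_py_alt query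
instance (query : String) (out : Bool) : Decidable (Spec_detectIllegalQuery_py query out) := by unfold Spec_detectIllegalQuery_py; infer_instance

-- ===== CLAIM (what is proved, stated in full; the proofs are below) =====
def Claim_equal_detectIllegalQuery_py : Prop := ∀ (query : String), Dom_detectIllegalQuery_py query → Spec_detectIllegalQuery_py query (detectIllegalQuery_py query)

-- ===== LEMMAS AND PROOFS =====

-- pair part of the flag-setting branch conditions of A, as a function of (last, chunk)
def pvPairHit (last : Option String) (x : String) : Bool :=
  (x == "into" && last == some "insert") || (x == "from" && last == some "delete") ||
  (x == "table" && last == some "create") || (x == "table" && last == some "drop")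

-- union of all of A's flag-setting branch conditions
def pvHit (last : Option String) (x : String) : Bool :=
  pvPairHit last x || x == "update"

-- OR of all hits while scanning a word list starting from a given 'last'
def pvG : Option String → List String → Bool
  | _, [] => false
  | last, x :: xs => pvHit last x || pvG (some x) xs

-- pair-only scan
def pvPS : Option String → List String → Bool
  | _, [] => false
  | last, x :: xs => pvPairHit last x || pvPS (some x) xs

theorem pvG_cons (last : Option String) (x : String) (xs : List String) :
    pvG last (x :: xs) = (pvHit last x || pvG (some x) xs) := rfl

theorem pvStep_skip (s : Bool × Bool × Bool × Bool × Bool × Option String) (x : String)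
    (h : (PySem.Str.strip x == "") = true) : pvStep s x = s := by
  obtain ⟨i, d, u, dr, c, last⟩ := s
  simp [pvStep, h]

theorem pvStep_keep (i d u dr c : Bool) (last : Option String) (x : String)
    (h : (PySem.Str.strip x == "") = false) :
    pvStep (i, d, u, dr, c, last) x =
      (i || (x == "into" && last == some "insert"),
       d || (x == "from" && last == some "delete"),
       u || (x == "update"),
       dr || (x == "table" && last == some "drop"),
       c || (x == "table" && last == some "create"),
       some x) := by
  simp only [pvStep, h, Bool.false_eq_true, if_false]
  split_ifs with h1 h2 h3 h4 h5 <;> simp_all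

theorem pvFold_inv (l : List String) : ∀ (i d u dr c : Bool) (last : Option String),
    (match l.foldl pvStep (i, d, u, dr, c, last) with
      | (insert, delete, update, drop, create, _) => insert || delete || create || update || drop)
    = ((i || d || c || u || dr) || pvG last (l.filter (fun s => !(PySem.Str.strip s == "")))) := by
  induction l with
  | nil => intro i d u dr c last; simp [pvG]
  | cons x xs ih =>
    intro i d u dr c last
    rcases h0 : (PySem.Str.strip x == "") with _ | _
    · rw [List.foldl_cons, pvStep_keep i d u dr c last x h0, ih]
      simp [h0, pvG_cons, pvHit, pvPairHit, Bool.or_assoc, Bool.or_comm,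
        Bool.or_left_comm]
    · rw [List.foldl_cons, pvStep_skip _ x h0, ih]
      simp [h0]

theorem pvG_eq (w : List String) : ∀ last, pvG last w = (w.contains "update" || pvPS last w) := by
  induction w with
  | nil => intro last; rfl
  | cons x xs ih =>
    intro last
    simp only [pvG, pvPS, pvHit, ih, List.contains_cons, Bool.beq_comm (a := "update")]
    simp only [Bool.or_assoc]
    simp [Bool.or_left_comm]

theorem pvPairHit_some (p x : String) :
    pvPairHit (some p) x = pvPairs.contains (p, x) := by
  simp only [pvPairHit, pvPairs, List.contains_cons, List.contains_nil, Bool.or_false]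
  show _ = ((p, x) == ("insert", "into") || ((p, x) == ("delete", "from") ||
    ((p, x) == ("create", "table") || (p, x) == ("drop", "table"))))
  have e : ∀ a b : String, ((p, x) == (a, b)) = (p == a && x == b) := fun a b => rfl
  simp only [e, Option.some_beq_some]
  simp [Bool.and_comm, Bool.or_assoc]

-- positional characterisation of the pair-only scan
theorem pvPS_iff (w : List String) : ∀ last : Option String,
    pvPS last w = true ↔
      (∃ ab ∈ pvPairs, ∃ j : Nat, (j = 0 ∧ last = some ab.1 ∧ w[0]? = some ab.2) ∨
        (w[j]? = some ab.1 ∧ w[j+1]? = some ab.2)) := by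
  induction w with
  | nil =>
    intro last
    simp [pvPS]
  | cons x xs ih =>
    intro last
    simp only [pvPS, Bool.or_eq_true, ih (some x)]
    constructor
    · rintro (h | ⟨ab, hab, j, hj⟩)
      · cases last with
        | none => simp [pvPairHit] at h
        | some p =>
          rw [pvPairHit_some] at h
          refine ⟨(p, x), by simpa using h, 0, Or.inl ⟨rfl, rfl, by simp⟩⟩
      · rcases hj with ⟨h0, hl, hx⟩ | ⟨h1, h2⟩
        · have hx1 : x = ab.1 := by simpa using hl
          exact ⟨ab, hab, 0, Or.inr ⟨by simp [hx1], by simpa using hx⟩⟩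
        · exact ⟨ab, hab, j + 1, Or.inr ⟨by simpa using h1, by simpa using h2⟩⟩
    · rintro ⟨ab, hab, j, ⟨h0, hl, hx⟩ | ⟨h1, h2⟩⟩
      · left
        subst hl
        have hx' : x = ab.2 := by simpa using hx
        subst hx'
        rw [pvPairHit_some]
        simpa using hab
      · cases j with
        | zero =>
          have hx' : x = ab.1 := by simpa using h1
          subst hx'
          exact Or.inr ⟨ab, hab, 0, Or.inl ⟨rfl, rfl, by simpa using h2⟩⟩
        | succ k =>
          exact Or.inr ⟨ab, hab, k, Or.inr ⟨by simpa using h1, by simpa using h2⟩⟩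

theorem pvPS_none_iff (w : List String) :
    pvPS none w = true ↔
      ∃ ab ∈ pvPairs, ∃ j : Nat, w[j]? = some ab.1 ∧ w[j+1]? = some ab.2 := by
  rw [pvPS_iff]
  constructor
  · rintro ⟨ab, hab, j, ⟨_, hl, _⟩ | h⟩
    · cases hl
    · exact ⟨ab, hab, j, h⟩
  · rintro ⟨ab, hab, j, h⟩
    exact ⟨ab, hab, j, Or.inr h⟩

-- the inverted index B builds, and its lookup contents
def pvIdx (ws : List String) : PySem.Dict String (List Int) :=
  (PySem.List.enumerate ws).foldl
    (fun d (p : Int × String) => d.modify p.2 ([] : List Int) (· ++ [p.1])) PySem.Dict.empty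

theorem pvIdx_getD (ws : List String) (w : String) :
    (pvIdx ws).getD w [] =
      (((PySem.List.enumerate ws).filter (fun p => p.2 == w)).map (·.1)) := by
  unfold pvIdx
  have : (PySem.List.enumerate ws).foldl
      (fun d (p : Int × String) => d.modify p.2 ([] : List Int) (· ++ [p.1])) PySem.Dict.empty
      = ((PySem.List.enumerate ws).map (fun p => (p.2, p.1))).foldl
      (fun d (p : String × Int) => d.modify p.1 ([] : List Int) (· ++ [p.2])) PySem.Dict.empty := by
    rw [List.foldl_map]
  rw [this, PySem.Dict.getD_foldl_modify_append]
  simp [List.filter_map, Function.comp_def]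

theorem pvIdx_contains (ws : List String) (w : String) :
    (pvIdx ws).contains w = ws.contains w := by
  have hk : (pvIdx ws).keys = PySem.Set.ofList ws := by
    unfold pvIdx
    rw [PySem.Dict.keys_foldl_modify_key (key := fun p : Int × String => p.2),
      PySem.List.map_snd_enumerate]
    show PySem.Set.update ([] : List String) ws = _
    rw [PySem.Set.update_nil_left]
  rw [Bool.eq_iff_iff, PySem.Dict.contains_iff_mem_keys, hk]
  simp [PySem.Set.mem_ofList]

theorem pvMemEnum (ws : List String) : ∀ (s : Int) (p : Int × String),
    p ∈ PySem.List.enumerate ws s ↔ ∃ k : Nat, p.1 = s + k ∧ ws[k]? = some p.2 := by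
  induction ws with
  | nil => intro s p; simp [PySem.List.enumerate_nil]
  | cons x xs ih =>
    intro s p
    rw [PySem.List.enumerate_cons, List.mem_cons, ih]
    constructor
    · rintro (rfl | ⟨k, hk, hg⟩)
      · exact ⟨0, by simp⟩
      · exact ⟨k + 1, by push_cast at hk ⊢; omega, by simpa using hg⟩
    · rintro ⟨k, hk, hg⟩
      cases k with
      | zero =>
        left
        obtain ⟨p1, p2⟩ := p
        simp only at hk hg
        simp only [List.getElem?_cons_zero, Option.some.injEq] at hg
        simp [hk, hg.symm]
      | succ m =>
        exact Or.inr ⟨m, by push_cast at hk ⊢; omega, by simpa using hg⟩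

theorem pvMemPos (ws : List String) (w : String) (i : Int) :
    i ∈ (pvIdx ws).getD w [] ↔ ∃ k : Nat, i = (k : Int) ∧ ws[k]? = some w := by
  rw [pvIdx_getD]
  simp only [List.mem_map, List.mem_filter]
  constructor
  · rintro ⟨p, ⟨hp, hw⟩, rfl⟩
    obtain ⟨k, hk, hg⟩ := (pvMemEnum ws 0 p).1 hp
    exact ⟨k, by omega, by rw [hg]; simp_all⟩
  · rintro ⟨k, rfl, hg⟩
    exact ⟨((k : Int), w), ⟨(pvMemEnum ws 0 _).2 ⟨k, by simp, hg⟩, by simp⟩, rfl⟩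

theorem pvPairLookup (ws : List String) (ab : String × String) :
    (((pvIdx ws).getD ab.1 []).any (fun i => ((pvIdx ws).getD ab.2 []).contains (i + 1))) = true ↔
      ∃ j : Nat, ws[j]? = some ab.1 ∧ ws[j+1]? = some ab.2 := by
  simp only [List.any_eq_true, List.contains_iff_mem, pvMemPos]
  constructor
  · rintro ⟨i, ⟨j, rfl, hj⟩, k, hk, hg⟩
    have : k = j + 1 := by omega
    subst this
    exact ⟨j, hj, hg⟩
  · rintro ⟨j, h1, h2⟩
    exact ⟨(j : Int), ⟨j, rfl, h1⟩, j + 1, by push_cast; ring, h2⟩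

-- ===== VERDICT (by name: the statement is the Claim_ definition above) =====
set_option maxHeartbeats 1000000 in
theorem detectIllegalQuery_py_spec : Claim_equal_detectIllegalQuery_py := by
  intro query _
  unfold Spec_detectIllegalQuery_py detectIllegalQuery_py detectIllegalQuery_py_alt
  rw [pvFold_inv]
  simp only [Bool.false_or]
  rw [pvG_eq]
  show _ = ((pvIdx _).contains "update" || pvPairs.any _)
  set ws := ((PySem.Str.split? (PySem.Str.lower query) " ").getD []).filter
    (fun c => !(PySem.Str.strip c == "")) with hws
  rw [pvIdx_contains]
  congr 1
  rw [Bool.eq_iff_iff, pvPS_none_iff, List.any_eq_true]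
  constructor
  · rintro ⟨ab, hab, h⟩
    exact ⟨ab, hab, (pvPairLookup ws ab).2 h⟩
  · rintro ⟨ab, hab, h⟩
    exact ⟨ab, hab, (pvPairLookup ws ab).1 h⟩
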